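-- pv_equiv track=rewrite | github.com/hi-meral/python | Scaler/Day-76/hq-1.py | solve
-- ===== SOURCE A (Python) =====
-- from collections import deque
--
-- class Dequeue:
--     def __init__(self):
--         self.buffer = deque()
--
--     def enqueue(self, val):
--         self.buffer.append(val)
--
--     def enqueueleft(self, val):
--         self.buffer.appendleft(val)
--
--     def dequeue(self):
--         if len(self.buffer) == 0:
--             return
--
--         return self.buffer.popleft()
--
--     def dequeueright(self):
--         if len(self.buffer) == 0:
--             return
--
--         return self.buffer.pop()
--
--     def is_empty(self):
--         return len(self.buffer) == 0
--
--     def front(self):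
--         return self.buffer[0]
--
--     def rear(self):
--         return self.buffer[-1]
--
--     def size(self):
--         return len(self.buffer)
--
-- def solve(A, B):
--
--     N = len(A)
--     dq = Dequeue()
--     C = 0
--
--     for i in range(B):
--
--         while dq.size() and dq.rear() < A[i]:
--             dq.dequeueright()
--
--         dq.enqueue(A[i])
--
--     C += dq.front()
--
--     for i in range(B, N):
--
--         if dq.front() == A[i-B]:
--             dq.dequeue()
--
--         while dq.size() and dq.rear() < A[i]:
--             dq.dequeueright()
--
--         dq.enqueue(A[i])
--
--         C += dq.front()
--
--     dq = Dequeue()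
--
--     for i in range(B):
--
--         while dq.size() and dq.rear() > A[i]:
--             dq.dequeueright()
--
--         dq.enqueue(A[i])
--
--     C += dq.front()
--
--     for i in range(B, N):
--
--         if dq.front() == A[i-B]:
--             dq.dequeue()
--
--         while dq.size() and dq.rear() > A[i]:
--             dq.dequeueright()
--
--         dq.enqueue(A[i])
--
--         C += dq.front()
--
--     return C % 1000000007
-- ===== SOURCE B (Python) =====
-- def solve(A, B):
--     N = len(A)
--     total = 0
--     for i in range(N - B + 1):
--         w = A[i:i+B]
--         total += max(w) + min(w)
--     return total % 1000000007
-- ===== Notes on version B (the rewrite author's own statement) =====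
-- stated objective: simpler
-- what changed: Replaced the two monotonic-deque passes (prime-window loop plus sliding eviction loop, done once for max and once for min) by a single direct loop that takes each window slice and adds max(w)+min(w) with the builtins.
import Mathlib
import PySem

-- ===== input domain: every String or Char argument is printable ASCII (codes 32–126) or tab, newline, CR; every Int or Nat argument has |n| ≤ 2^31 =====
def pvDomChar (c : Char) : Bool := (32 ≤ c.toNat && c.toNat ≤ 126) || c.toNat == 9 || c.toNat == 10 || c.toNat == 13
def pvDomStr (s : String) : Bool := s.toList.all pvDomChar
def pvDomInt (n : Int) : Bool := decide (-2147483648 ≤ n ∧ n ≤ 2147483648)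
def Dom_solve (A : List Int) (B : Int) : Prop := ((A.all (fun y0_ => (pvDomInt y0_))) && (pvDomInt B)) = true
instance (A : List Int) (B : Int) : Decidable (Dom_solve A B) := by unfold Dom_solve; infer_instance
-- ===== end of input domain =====

-- B replaces A's two monotonic-deque passes by a direct per-window max+min scan (simpler, not faster);
-- equivalence is proved for 1 ≤ B ≤ len(A), exactly where the Python A returns without raising.

-- ===== PORT A =====
-- A's deque buffer, front first.  'while dq.size() and cmp(dq.rear(), A[i]): dq.dequeueright()' then 'dq.enqueue(A[i])';
-- the two textually duplicated passes of A differ only in the comparison, kept as the parameter cmp.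
def dqStep (cmp : Int → Int → Bool) (dq : List Int) (v : Int) : List Int :=
  ((dq.reverse.dropWhile (fun r => cmp r v)).reverse) ++ [v]

-- one pass of A's code: prime loop over range(B), C = dq.front(), then the sliding loop over range(B, N)
def solvePass (cmp : Int → Int → Bool) (A : List Int) (B : Int) : Int :=
  let N : Int := A.length
  let dq : List Int := (PySem.List.pyRange 0 B 1).foldl
      (fun dq i => dqStep cmp dq (PySem.List.pyGetD A i 0)) []
  let C : Int := PySem.List.pyGetD dq 0 0   -- dq.front(); Python raises on an empty deque: outside Pre_
  let st : List Int × Int := (PySem.List.pyRange B N 1).foldl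
      (fun st i =>
        let dq1 := if PySem.List.pyGetD st.1 0 0 == PySem.List.pyGetD A (i - B) 0 then st.1.tail else st.1
        let dq2 := dqStep cmp dq1 (PySem.List.pyGetD A i 0)
        (dq2, st.2 + PySem.List.pyGetD dq2 0 0)) (dq, C)
  st.2

def solve (A : List Int) (B : Int) : Int :=
  PySem.Int.mod (solvePass (fun r v => decide (r < v)) A B
               + solvePass (fun r v => decide (r > v)) A B) 1000000007

-- ===== PORT B =====
def solve_alt (A : List Int) (B : Int) : Int :=
  let N : Int := A.length
  let total : Int := (PySem.List.pyRange 0 (N - B + 1) 1).foldl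
      (fun total i =>
        let w := PySem.List.slice A (some i) (some (i + B))
        total + (PySem.List.max? w (fun x => x)).getD 0
              + (PySem.List.min? w (fun x => x)).getD 0) 0
  PySem.Int.mod total 1000000007

-- ===== PRECONDITION & SPEC =====
-- Pre_: exactly the inputs where Python A returns (B ≤ 0 or B > len(A) make A's dq.front()/A[i] raise IndexError).
def Pre_solve (A : List Int) (B : Int) : Prop := 1 ≤ B ∧ B ≤ A.length
instance (A : List Int) (B : Int) : Decidable (Pre_solve A B) := by unfold Pre_solve; infer_instance
def pvWitness_solve : List Int × Int := ([3, -1, 4, 1, 5], 2)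

def Spec_solve (A : List Int) (B : Int) (out : Int) : Prop := out = solve_alt A B
instance (A : List Int) (B : Int) (out : Int) : Decidable (Spec_solve A B out) := by unfold Spec_solve; infer_instance

-- ===== CLAIM (what is proved, stated in full; the proofs are below) =====
def Claim_equal_solve : Prop := ∀ (A : List Int) (B : Int), Dom_solve A B → Pre_solve A B → Spec_solve A B (solve A B)

-- ===== LEMMAS AND PROOFS =====

-- properties of the two comparisons, packaged
def CmpOK (cmp : Int → Int → Bool) : Prop :=
  (∀ a, cmp a a = false) ∧
  (∀ a b c, cmp a b = true → cmp b c = true → cmp a c = true) ∧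
  (∀ a b c, cmp a b = false → cmp a c = true → cmp b c = true)

theorem cmpOK_lt : CmpOK (fun r v => decide (r < v)) := by
  refine ⟨fun a => by simp, fun a b c h1 h2 => ?_, fun a b c h1 h2 => ?_⟩ <;>
    simp_all <;> omega

theorem cmpOK_gt : CmpOK (fun r v => decide (r > v)) := by
  refine ⟨fun a => by simp, fun a b c h1 h2 => ?_, fun a b c h1 h2 => ?_⟩ <;>
    simp_all <;> omega

-- S1: if every element of dq is beaten by v, the whole deque is popped
theorem dqStep_all (cmp : Int → Int → Bool) (dq : List Int) (v : Int)
    (h : ∀ z ∈ dq, cmp z v = true) : dqStep cmp dq v = [v] := by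
  unfold dqStep
  rw [List.dropWhile_eq_nil_iff.mpr (by intro x hx; simp_all [List.mem_reverse] )]
  simp

-- S2: a front element not beaten by v stays in front
theorem dqStep_cons (cmp : Int → Int → Bool) (x : Int) (dq : List Int) (v : Int)
    (h : cmp x v = false) : dqStep cmp (x :: dq) v = x :: dqStep cmp dq v := by
  unfold dqStep
  have : (x :: dq).reverse = dq.reverse ++ [x] := by simp
  rw [this, List.dropWhile_append]
  by_cases he : (dq.reverse.dropWhile (fun r => cmp r v)).isEmpty
  · rw [if_pos he]
    rw [List.isEmpty_iff] at he
    simp [he, h]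
  · rw [if_neg he]
    simp

-- S3: membership after a step
theorem dqStep_mem (cmp : Int → Int → Bool) (dq : List Int) (v y : Int)
    (h : y ∈ dqStep cmp dq v) : y ∈ dq ∨ y = v := by
  unfold dqStep at h
  rcases List.mem_append.mp h with h' | h'
  · left
    have := (List.dropWhile_sublist (l := dq.reverse) (p := fun r => cmp r v)).mem
      (List.mem_reverse.mp h')
    simpa using this
  · right; simpa using h'

-- G: the master fold lemma — an undominated front x either survives in front or,
-- once some element of w beats it, the fold forgets the whole prefix
theorem fold_cons (cmp : Int → Int → Bool) (hc : CmpOK cmp) :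
    ∀ (w : List Int) (x : Int) (d : List Int), (∀ z ∈ d, cmp x z = false) →
      List.foldl (dqStep cmp) (x :: d) w =
        if w.any (fun y => cmp x y) then List.foldl (dqStep cmp) [] w
        else x :: List.foldl (dqStep cmp) d w := by
  intro w
  induction w with
  | nil => intro x d hd; simp
  | cons v w' ih =>
    intro x d hd
    by_cases hxv : cmp x v = true
    · have hall : ∀ z ∈ x :: d, cmp z v = true := by
        intro z hz
        rcases List.mem_cons.mp hz with rfl | hz
        · exact hxv
        · exact hc.2.2 x z v (hd z hz) hxv
      simp only [List.foldl_cons, dqStep_all cmp (x :: d) v hall,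
        dqStep_all cmp [] v (by simp)]
      simp [List.any_cons, hxv]
    · have hxv' : cmp x v = false := by simpa using hxv
      have hd' : ∀ z ∈ dqStep cmp d v, cmp x z = false := by
        intro z hz
        rcases dqStep_mem cmp d v z hz with hz' | rfl
        · exact hd z hz'
        · exact hxv'
      simp only [List.foldl_cons, dqStep_cons cmp x d v hxv']
      rw [ih x (dqStep cmp d v) hd']
      by_cases hany : w'.any (fun y => cmp x y) = true
      · -- some later y beats x (and hence beats v): both sides forget the prefix
        obtain ⟨y, hy, hxy⟩ := List.any_eq_true.mp hany
        have hvy : cmp v y = true := hc.2.2 x v y hxv' hxy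
        have h0 : dqStep cmp [] v = [v] := dqStep_all cmp [] v (by simp)
        have h3 : List.foldl (dqStep cmp) [v] w' = List.foldl (dqStep cmp) [] w' := by
          rw [ih v [] (by simp)]
          simp [List.any_eq_true.mpr ⟨y, hy, hvy⟩]
        simp [List.any_cons, hxv', hany, h0, h3]
      · have hany' : w'.any (fun y => cmp x y) = false := by simpa using hany
        simp [List.any_cons, hxv', hany']

-- H: the front of the deque built from w is a best element of w
theorem fold_head (cmp : Int → Int → Bool) (hc : CmpOK cmp) :
    ∀ (w : List Int), w ≠ [] →
      ∃ m, (List.foldl (dqStep cmp) [] w).head? = some m ∧ m ∈ w ∧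
        ∀ z ∈ w, cmp m z = false := by
  intro w
  induction w with
  | nil => intro h; exact absurd rfl h
  | cons v w' ih =>
    intro _
    have hstep : List.foldl (dqStep cmp) [] (v :: w') =
        List.foldl (dqStep cmp) [v] w' := by
      rw [List.foldl_cons, dqStep_all cmp [] v (by simp)]
    rw [hstep, fold_cons cmp hc w' v [] (by simp)]
    by_cases hany : w'.any (fun y => cmp v y) = true
    · obtain ⟨y, hy, hvy⟩ := List.any_eq_true.mp hany
      obtain ⟨m, hm1, hm2, hm3⟩ := ih (by rintro rfl; simp at hy)
      refine ⟨m, by simp [hany, hm1], List.mem_cons_of_mem _ hm2, ?_⟩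
      intro z hz
      rcases List.mem_cons.mp hz with rfl | hz'
      · by_contra hmz
        have hmz' : cmp m z = true := by simpa using hmz
        have := hc.2.1 m z y hmz' hvy
        rw [hm3 y hy] at this; exact absurd this (by simp)
      · exact hm3 z hz'
    · have hany' : w'.any (fun y => cmp v y) = false := by simpa using hany
      refine ⟨v, by simp [hany'], List.mem_cons_self, ?_⟩
      intro z hz
      rcases List.mem_cons.mp hz with rfl | hz'
      · exact hc.1 z
      · simpa using (List.any_eq_false.mp hany') z hz'

-- EVICT: A's conditional front-pop turns the fold of (x :: w) into the fold of w
theorem fold_evict (cmp : Int → Int → Bool) (hc : CmpOK cmp) (x : Int) (w : List Int) :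
    (if (List.foldl (dqStep cmp) [] (x :: w)).headD 0 = x
      then (List.foldl (dqStep cmp) [] (x :: w)).tail
      else List.foldl (dqStep cmp) [] (x :: w)) = List.foldl (dqStep cmp) [] w := by
  have hstep : List.foldl (dqStep cmp) [] (x :: w) =
      List.foldl (dqStep cmp) [x] w := by
    rw [List.foldl_cons, dqStep_all cmp [] x (by simp)]
  rw [hstep, fold_cons cmp hc w x [] (by simp)]
  by_cases hany : w.any (fun y => cmp x y) = true
  · obtain ⟨y, hy, hxy⟩ := List.any_eq_true.mp hany
    obtain ⟨m, hm1, hm2, hm3⟩ := fold_head cmp hc w (by rintro rfl; simp at hy)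
    have hmx : m ≠ x := by
      rintro rfl; rw [hm3 y hy] at hxy; exact absurd hxy (by simp)
    have hne : (List.foldl (dqStep cmp) [] w).head?.getD 0 ≠ x := by
      rw [hm1]; simpa using hmx
    simp [hany, hne]
  · have hany' : w.any (fun y => cmp x y) = false := by simpa using hany
    simp [hany']

-- best value of a window, as A computes it
def bestVal (cmp : Int → Int → Bool) (w : List Int) : Int :=
  (List.foldl (dqStep cmp) [] w).headD 0

theorem bestVal_max (w : List Int) (hw : w ≠ []) :
    bestVal (fun r v => decide (r < v)) w = (PySem.List.max? w (fun x => x)).getD 0 := by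
  obtain ⟨m, hm1, hm2, hm3⟩ := fold_head _ cmpOK_lt w hw
  cases w with
  | nil => exact absurd rfl hw
  | cons c t =>
    have hle : ∀ z ∈ c :: t, z ≤ m := by
      intro z hz
      have := hm3 z hz; simp at this; omega
    have h1 : m ≤ t.foldl max c := by
      rcases List.mem_cons.mp hm2 with rfl | h
      · exact (PySem.List.le_foldl_max t m).1
      · exact (PySem.List.le_foldl_max t c).2 m h
    have h2 : t.foldl max c ≤ m := by
      rcases PySem.List.foldl_max_mem t c with h | h
      · rw [h]; exact hle c List.mem_cons_self
      · exact hle _ (List.mem_cons_of_mem _ h)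
    rw [PySem.List.max?_id_cons]
    unfold bestVal
    rw [List.headD_eq_head?_getD, hm1]
    simp
    omega

theorem bestVal_min (w : List Int) (hw : w ≠ []) :
    bestVal (fun r v => decide (r > v)) w = (PySem.List.min? w (fun x => x)).getD 0 := by
  obtain ⟨m, hm1, hm2, hm3⟩ := fold_head _ cmpOK_gt w hw
  cases w with
  | nil => exact absurd rfl hw
  | cons c t =>
    have hle : ∀ z ∈ c :: t, m ≤ z := by
      intro z hz
      have := hm3 z hz; simp at this; omega
    have h1 : t.foldl min c ≤ m := by
      rcases List.mem_cons.mp hm2 with rfl | h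
      · exact (PySem.List.foldl_min_le t m).1
      · exact (PySem.List.foldl_min_le t c).2 m h
    have h2 : m ≤ t.foldl min c := by
      rcases PySem.List.foldl_min_mem t c with h | h
      · rw [h]; exact hle c List.mem_cons_self
      · exact hle _ (List.mem_cons_of_mem _ h)
    rw [PySem.List.min?_id_cons]
    unfold bestVal
    rw [List.headD_eq_head?_getD, hm1]
    simp
    omega

theorem getD_zero_headD (l : List Int) : l.getD 0 0 = l.headD 0 := by
  cases l <;> rfl

-- the sliding loop of one pass, characterised (Nat indices; b = B.toNat)
theorem pass_loop (cmp : Int → Int → Bool) (hc : CmpOK cmp) (A : List Int) (b : Nat)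
    (hb : 1 ≤ b) :
    ∀ (k i : Nat), b ≤ i → i + k = A.length → ∀ C : Int,
      (PySem.List.pyRange (i : Int) (A.length : Int) 1).foldl
        (fun (st : List Int × Int) j =>
          let dq1 := if PySem.List.pyGetD st.1 0 0 == PySem.List.pyGetD A (j - (b : Int)) 0 then st.1.tail else st.1
          let dq2 := dqStep cmp dq1 (PySem.List.pyGetD A j 0)
          (dq2, st.2 + PySem.List.pyGetD dq2 0 0))
        (List.foldl (dqStep cmp) [] ((A.drop (i - b)).take b), C)
      = (List.foldl (dqStep cmp) [] ((A.drop (A.length - b)).take b),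
         C + ((List.range' (i - b + 1) k).map
                (fun j => bestVal cmp ((A.drop j).take b))).sum) := by
  intro k
  induction k with
  | zero =>
    intro i hbi hik C
    have hi : i = A.length := by omega
    subst hi
    rw [PySem.List.pyRange_one_eq_nil (le_refl _)]
    simp
  | succ k ih =>
    intro i hbi hik C
    have hi : i < A.length := by omega
    have hib : i - b < A.length := by omega
    have hilt : (i : Int) < (A.length : Int) := by exact_mod_cast hi
    rw [PySem.List.pyRange_one_cons hilt, List.foldl_cons]
    have e1 : PySem.List.pyGetD A ((i : Int) - (b : Int)) 0 = A[i - b] := by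
      rw [show (i : Int) - (b : Int) = ((i - b : Nat) : Int) from by omega,
        PySem.List.pyGetD_natCast]
      exact List.getD_eq_getElem A 0 hib
    have e2 : PySem.List.pyGetD A (i : Int) 0 = A[i] := by
      rw [PySem.List.pyGetD_natCast]
      exact List.getD_eq_getElem A 0 hi
    have htake_cons : ∀ (x : Int) (l : List Int),
        List.take b (x :: l) = x :: List.take (b - 1) l := by
      intro x l
      obtain ⟨b', rfl⟩ : ∃ b', b = b' + 1 := ⟨b - 1, by omega⟩
      simp
    have htake_snoc : ∀ l : List Int,
        List.take b l = List.take (b - 1) l ++ l[b - 1]?.toList := by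
      intro l
      obtain ⟨b', rfl⟩ : ∃ b', b = b' + 1 := ⟨b - 1, by omega⟩
      simpa using List.take_add_one
    have ewin : (A.drop (i - b)).take b
        = A[i - b] :: ((A.drop (i - b + 1)).take (b - 1)) := by
      rw [List.drop_eq_getElem_cons hib, htake_cons]
    have ewin2 : ((A.drop (i - b + 1)).take (b - 1)) ++ [A[i]]
        = (A.drop (i - b + 1)).take b := by
      rw [htake_snoc]
      congr 1
      rw [List.getElem?_drop, show i - b + 1 + (b - 1) = i from by omega]
      simp [List.getElem?_eq_getElem hi]
    have eev :
        (if (List.foldl (dqStep cmp) [] ((A.drop (i - b)).take b)).getD 0 0 = A[i - b]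
          then (List.foldl (dqStep cmp) [] ((A.drop (i - b)).take b)).tail
          else List.foldl (dqStep cmp) [] ((A.drop (i - b)).take b))
        = List.foldl (dqStep cmp) [] ((A.drop (i - b + 1)).take (b - 1)) := by
      rw [getD_zero_headD, ewin]
      exact fold_evict cmp hc _ _
    have estep : dqStep cmp (List.foldl (dqStep cmp) [] ((A.drop (i - b + 1)).take (b - 1))) A[i]
        = List.foldl (dqStep cmp) [] ((A.drop (i - b + 1)).take b) := by
      rw [← ewin2, List.foldl_append]
      rfl
    have bestVal_eq : ∀ w : List Int,
        (List.foldl (dqStep cmp) [] w).headD 0 = bestVal cmp w := fun _ => rfl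
    have hrec := ih (i + 1) (by omega) (by omega)
      (C + bestVal cmp ((A.drop (i - b + 1)).take b))
    rw [show ((i + 1 : Nat) : Int) = (i : Int) + 1 from by push_cast; ring,
      show (i + 1) - b = i - b + 1 from by omega] at hrec
    simp only [beq_iff_eq, PySem.List.pyGetD_zero] at hrec ⊢
    simp only [e1, e2]
    rw [eev, estep, getD_zero_headD, bestVal_eq, hrec, List.range'_succ]
    simp only [List.map_cons, List.sum_cons, Prod.mk.injEq]
    refine ⟨trivial, ?_⟩
    rw [show i - b + 1 + 1 = i - b + 2 from by omega]
    ring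

-- one full pass of A equals the sum of window bests
theorem pass_eq (cmp : Int → Int → Bool) (hc : CmpOK cmp) (A : List Int) (B : Int)
    (h1 : 1 ≤ B) (h2 : B ≤ A.length) :
    solvePass cmp A B =
      ((List.range (A.length - B.toNat + 1)).map
        (fun j => bestVal cmp ((A.drop j).take B.toNat))).sum := by
  have hB : (B.toNat : Int) = B := Int.toNat_of_nonneg (by omega)
  have hbn : B.toNat ≤ A.length := by omega
  have hb1 : 1 ≤ B.toNat := by omega
  simp only [solvePass]
  rw [← hB]
  -- the priming loop builds the deque of the first window A.take b
  have hlen : PySem.List.len (A.take B.toNat) = (B.toNat : Int) := by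
    simp [PySem.List.len, List.length_take, Nat.min_eq_left hbn]
  have hprime : (PySem.List.pyRange 0 (B.toNat : Int)).foldl
      (fun dq i => dqStep cmp dq (PySem.List.pyGetD A i 0)) []
      = List.foldl (dqStep cmp) [] (A.take B.toNat) := by
    rw [← PySem.List.foldl_pyRange_zero_pyGetD (A.take B.toNat) 0 (dqStep cmp) [], hlen]
    apply PySem.List.foldl_congr_mem
    intro acc x hx
    rw [PySem.List.mem_pyRange_one] at hx
    congr 1
    rw [PySem.List.pyGetD_of_nonneg _ _ hx.1, PySem.List.pyGetD_of_nonneg _ _ hx.1,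
      List.getD_eq_getElem?_getD, List.getD_eq_getElem?_getD,
      List.getElem?_take_of_lt (by omega : x.toNat < B.toNat)]
  rw [hprime]
  -- the sliding loop, via pass_loop at i = b, k = n - b
  have hloop := pass_loop cmp hc A B.toNat hb1 (A.length - B.toNat) B.toNat
    (le_refl _) (by omega)
    (PySem.List.pyGetD (List.foldl (dqStep cmp) [] (A.take B.toNat)) 0 0)
  rw [Nat.sub_self, List.drop_zero] at hloop
  rw [hloop]
  rw [PySem.List.pyGetD_zero, getD_zero_headD]
  rw [List.range_eq_range', List.range'_succ, List.map_cons, List.sum_cons]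
  simp [bestVal, hB]

theorem solve_alt_eq (A : List Int) (B : Int) (h1 : 1 ≤ B) (h2 : B ≤ A.length) :
    solve_alt A B = PySem.Int.mod
      (((List.range (A.length - B.toNat + 1)).map
          (fun j => ((PySem.List.max? ((A.drop j).take B.toNat) (fun x => x)).getD 0
                   + (PySem.List.min? ((A.drop j).take B.toNat) (fun x => x)).getD 0))).sum)
      1000000007 := by
  have hB : (B.toNat : Int) = B := Int.toNat_of_nonneg (by omega)
  simp only [solve_alt]
  rw [← hB,
    show (A.length : Int) - (B.toNat : Int) + 1 = ((A.length - B.toNat + 1 : Nat) : Int) from by omega,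
    PySem.List.pyRange_zero_nat, List.foldl_map]
  rw [PySem.List.foldl_congr_mem _ _
      (fun (total : Int) (k : Nat) => total +
        ((PySem.List.max? ((A.drop k).take B.toNat) (fun x => x)).getD 0
       + (PySem.List.min? ((A.drop k).take B.toNat) (fun x => x)).getD 0)) 0
      (by
        intro acc k _
        simp only [PySem.List.slice_natCast_add]
        ring),
    PySem.List.foldl_add, zero_add]
  simp [hB]

-- ===== VERDICT (by name: the statement is the Claim_ definition above) =====
theorem solve_spec : Claim_equal_solve := by
  intro A B _ hpre
  obtain ⟨h1, h2⟩ := hpre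
  unfold Spec_solve
  unfold solve
  rw [pass_eq _ cmpOK_lt A B h1 h2, pass_eq _ cmpOK_gt A B h1 h2, solve_alt_eq A B h1 h2]
  congr 1
  rw [← PySem.List.sum_map_add_int]
  apply congrArg
  apply List.map_congr_left
  intro j hj
  rw [List.mem_range] at hj
  have hne : (A.drop j).take B.toNat ≠ [] := by
    intro h
    have hlen := congrArg List.length h
    simp [List.length_take] at hlen
    omega
  rw [bestVal_max _ hne, bestVal_min _ hne]
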